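-- pv_equiv track=rewrite | github.com/ansabgillani/algorithmic-practice | leetcode/3152/solution.py | specialArrayII
-- ===== SOURCE A (Python) =====
-- def specialArrayII(nums, queries):
--     prefix_sum = [0] * (len(nums) + 1)
--     for i, num in enumerate(nums):
--         prefix_sum[i+1] = prefix_sum[i] ^ (num % 2)
--
--     answer = []
--     for q in queries:
--         start, end = q
--         if prefix_sum[start] != prefix_sum[end + 1]:
--             answer.append(True)
--         else:
--             answer.append(False)
--
--     return answer
-- ===== SOURCE B (Python) =====
-- def specialArrayII(nums, queries):
--     answer = []
--     for start, end in queries: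
--         odd = 0
--         for i in range(start, end + 1):
--             odd += nums[i] % 2
--         answer.append(odd % 2 == 1)
--     return answer
-- ===== Notes on version B (the rewrite author's own statement) =====
-- stated objective: alternative
-- what changed: Replaces the precomputed prefix-XOR parity table with a direct per-query index scan that sums element parities over nums[start..end] and tests the count's parity, trading A's O(n+q) table for a table-free O(n*q) brute force.
-- outside the precondition, e.g. on specialArrayII([2, 1], [[2, 0]]): A returns [True], B returns [False]; on specialArrayII([2, 1], [[-2, 0]]): A returns [False], B returns [True]
import Mathlib
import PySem

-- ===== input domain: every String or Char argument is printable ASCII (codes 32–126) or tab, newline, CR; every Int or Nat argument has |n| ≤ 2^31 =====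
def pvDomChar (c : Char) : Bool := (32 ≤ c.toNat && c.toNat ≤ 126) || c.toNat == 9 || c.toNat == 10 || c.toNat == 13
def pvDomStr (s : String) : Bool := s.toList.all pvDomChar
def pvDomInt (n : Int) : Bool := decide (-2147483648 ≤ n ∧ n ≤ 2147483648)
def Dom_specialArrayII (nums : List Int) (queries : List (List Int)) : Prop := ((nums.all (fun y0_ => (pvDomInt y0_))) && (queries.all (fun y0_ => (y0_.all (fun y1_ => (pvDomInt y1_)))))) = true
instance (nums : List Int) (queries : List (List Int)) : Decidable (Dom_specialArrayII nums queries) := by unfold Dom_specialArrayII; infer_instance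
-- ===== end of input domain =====

-- B answers each query by scanning the queried slice and testing the parity of the odd count,
-- instead of A's precomputed prefix-XOR table: a table-free alternative of the same behaviour.


-- ===== PORT A =====
def specialArrayII (nums : List Int) (queries : List (List Int)) : List Bool :=
  let prefix_sum :=
    (PySem.List.enumerate nums 0).foldl
      (fun ps p => PySem.List.pySetD ps (p.1 + 1)
          (PySem.Int.bxor (PySem.List.pyGetD ps p.1 0) (PySem.Int.mod p.2 2)))
      (List.replicate (nums.length + 1) 0)
  queries.foldl
    (fun answer q =>
      let start := PySem.List.pyGetD q 0 0
      let stop := PySem.List.pyGetD q 1 0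
      if PySem.List.pyGetD prefix_sum start 0 ≠ PySem.List.pyGetD prefix_sum (stop + 1) 0
      then answer ++ [true]
      else answer ++ [false])
    []

-- ===== PORT B =====
def specialArrayII_alt (nums : List Int) (queries : List (List Int)) : List Bool :=
  queries.foldl
    (fun answer q =>
      let start := PySem.List.pyGetD q 0 0
      let stop := PySem.List.pyGetD q 1 0
      let odd := (PySem.List.pyRange start (stop + 1) 1).foldl
          (fun a i => a + PySem.Int.mod (PySem.List.pyGetD nums i 0) 2) 0
      answer ++ [decide (PySem.Int.mod odd 2 = 1)])
    []

-- ===== PRECONDITION & SPEC =====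
-- Pre_ excludes queries that are not pairs (A raises ValueError) or whose endpoints lie outside
-- 0 ≤ start ≤ end+1 ≤ len(nums): out of bounds A raises IndexError, and on inverted or negative
-- in-bounds pairs A's value is an accident of its prefix-table lookup and Python negative indexing.
def Pre_specialArrayII (nums : List Int) (queries : List (List Int)) : Prop :=
  ∀ q ∈ queries, q.length = 2 ∧ 0 ≤ q.getD 0 0 ∧ q.getD 0 0 ≤ q.getD 1 0 + 1 ∧ q.getD 1 0 + 1 ≤ (nums.length : Int)
instance (nums : List Int) (queries : List (List Int)) : Decidable (Pre_specialArrayII nums queries) := by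
  unfold Pre_specialArrayII; infer_instance
def pvWitness_specialArrayII : List Int × List (List Int) := ([1, 2, 3], [[0, 2], [1, 1]])

def Spec_specialArrayII (nums : List Int) (queries : List (List Int)) (out : List Bool) : Prop := out = specialArrayII_alt nums queries
instance (nums : List Int) (queries : List (List Int)) (out : List Bool) : Decidable (Spec_specialArrayII nums queries out) := by unfold Spec_specialArrayII; infer_instance

-- ===== CLAIM (what is proved, stated in full; the proofs are below) =====
def Claim_equal_specialArrayII : Prop := ∀ (nums : List Int) (queries : List (List Int)), Dom_specialArrayII nums queries → Pre_specialArrayII nums queries → Spec_specialArrayII nums queries (specialArrayII nums queries)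

-- ===== LEMMAS AND PROOFS =====
def sumMods (l : List Int) : Int := (l.map (fun x => PySem.Int.mod x 2)).sum
lemma mod_two_eq_emod (x : Int) : PySem.Int.mod x 2 = x % 2 := by
  show Int.fmod x 2 = x % 2
  rw [Int.fmod_eq_emod]; simp
lemma bxor01 (p m : Int) (hp : p = 0 ∨ p = 1) (hm : m = 0 ∨ m = 1) :
    PySem.Int.bxor p m = (p + m) % 2 := by
  rcases hp with hp | hp <;> rcases hm with hm | hm <;> subst hp <;> subst hm <;> decide
lemma bxor01' (p m : Int) (hp : p = 0 ∨ p = 1) (hm : m = 0 ∨ m = 1) :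
    PySem.Int.bxor p m = 0 ∨ PySem.Int.bxor p m = 1 := by
  rcases hp with hp | hp <;> rcases hm with hm | hm <;> subst hp <;> subst hm <;> decide
lemma sumMods_append (l1 l2 : List Int) : sumMods (l1 ++ l2) = sumMods l1 + sumMods l2 := by
  simp [sumMods]
lemma foldl_add_mod (l : List Int) :
    l.foldl (fun a x => a + PySem.Int.mod x 2) 0 = sumMods l := by
  simpa [sumMods] using PySem.List.foldl_add (l := l) (g := fun x => PySem.Int.mod x 2) (a := 0)
lemma mod01 (x : Int) : PySem.Int.mod x 2 = 0 ∨ PySem.Int.mod x 2 = 1 := by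
  rw [mod_two_eq_emod]; omega

lemma build_loop (L : Nat) (xs : List Int) : ∀ (s : Nat) (ps : List Int),
    ps.length = L → s + xs.length < L →
    (∀ j : Nat, j < L → PySem.List.pyGetD ps (j : Int) 0 = 0 ∨ PySem.List.pyGetD ps (j : Int) 0 = 1) →
    ∀ j : Nat, j < L →
    PySem.List.pyGetD
      ((PySem.List.enumerate xs (s : Int)).foldl
        (fun ps p => PySem.List.pySetD ps (p.1 + 1)
            (PySem.Int.bxor (PySem.List.pyGetD ps p.1 0) (PySem.Int.mod p.2 2))) ps)
      (j : Int) 0 =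
    if s < j ∧ j ≤ s + xs.length then
      (PySem.List.pyGetD ps (s : Int) 0 + sumMods (xs.take (j - s))) % 2
    else PySem.List.pyGetD ps (j : Int) 0 := by
  induction xs with
  | nil =>
    intro s ps hL hlen h01 j hj
    rw [PySem.List.enumerate_nil, List.foldl_nil, if_neg (by simp only [List.length_nil, Nat.add_zero]; omega)]
  | cons x xs ih =>
    intro s ps hL hlen h01 j hj
    rw [PySem.List.enumerate_cons, List.foldl_cons]
    dsimp only
    have hcast : ((s : Int) + 1) = ((s + 1 : Nat) : Int) := by push_cast; ring
    rw [hcast]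
    have hsL : s + 1 < L := by simp at hlen; omega
    have hp01 : PySem.List.pyGetD ps (s : Int) 0 = 0 ∨ PySem.List.pyGetD ps (s : Int) 0 = 1 :=
      h01 s (by omega)
    have hget : ∀ m : Nat,
        PySem.List.pyGetD (PySem.List.pySetD ps (((s + 1 : Nat)) : Int)
          (PySem.Int.bxor (PySem.List.pyGetD ps (s : Int) 0) (PySem.Int.mod x 2))) (m : Int) 0 =
        if m = s + 1 then
          PySem.Int.bxor (PySem.List.pyGetD ps (s : Int) 0) (PySem.Int.mod x 2)
        else PySem.List.pyGetD ps (m : Int) 0 := by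
      intro m
      exact PySem.List.pyGetD_pySetD_natCast ps (s + 1) m _ _ (by omega)
    have hlen' : (PySem.List.pySetD ps (((s + 1 : Nat)) : Int)
        (PySem.Int.bxor (PySem.List.pyGetD ps (s : Int) 0) (PySem.Int.mod x 2))).length = L := by
      rw [PySem.List.length_pySetD, hL]
    have h01' : ∀ j : Nat, j < L →
        PySem.List.pyGetD (PySem.List.pySetD ps (((s + 1 : Nat)) : Int)
          (PySem.Int.bxor (PySem.List.pyGetD ps (s : Int) 0) (PySem.Int.mod x 2))) (j : Int) 0 = 0 ∨
        PySem.List.pyGetD (PySem.List.pySetD ps (((s + 1 : Nat)) : Int)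
          (PySem.Int.bxor (PySem.List.pyGetD ps (s : Int) 0) (PySem.Int.mod x 2))) (j : Int) 0 = 1 := by
      intro k hk
      rw [hget]
      split
      · exact bxor01' _ _ hp01 (mod01 x)
      · exact h01 k hk
    have := ih (s + 1) _ hlen' (by simp at hlen ⊢; omega) h01' j hj
    rw [this]
    rw [hget (s + 1), if_pos rfl, hget j]
    by_cases hc : s < j ∧ j ≤ s + (x :: xs).length
    · rw [if_pos hc]
      by_cases hj1 : j = s + 1
      · subst hj1
        rw [if_neg (by omega), if_pos rfl]
        have ht : (x :: xs).take (s + 1 - s) = [x] := by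
          have : s + 1 - s = 1 := by omega
          rw [this]; rfl
        rw [ht, bxor01 _ _ hp01 (mod01 x)]
        simp [sumMods]
      · rw [if_pos (by simp at hc; omega)]
        have ht : (x :: xs).take (j - s) = x :: xs.take (j - (s + 1)) := by
          have : j - s = (j - (s + 1)) + 1 := by omega
          rw [this, List.take_succ_cons]
        rw [ht]
        rw [bxor01 _ _ hp01 (mod01 x)]
        simp only [sumMods, List.map_cons, List.sum_cons, mod_two_eq_emod]
        omega
    · rw [if_neg hc, if_neg (by simp at hc ⊢; omega), if_neg (by simp at hc; omega)]

lemma prefix_table (nums : List Int) (j : Nat) (hj : j ≤ nums.length) :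
    PySem.List.pyGetD
      ((PySem.List.enumerate nums 0).foldl
        (fun ps p => PySem.List.pySetD ps (p.1 + 1)
            (PySem.Int.bxor (PySem.List.pyGetD ps p.1 0) (PySem.Int.mod p.2 2)))
        (List.replicate (nums.length + 1) 0))
      (j : Int) 0 = sumMods (nums.take j) % 2 := by
  have h0 : ∀ k : Nat, k < nums.length + 1 →
      PySem.List.pyGetD (List.replicate (nums.length + 1) (0 : Int)) (k : Int) 0 = 0 := by
    intro k hk
    rw [PySem.List.pyGetD_natCast]
    simp
  have hz : ((0 : Nat) : Int) = (0 : Int) := rfl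
  have := build_loop (nums.length + 1) nums 0 (List.replicate (nums.length + 1) 0)
    (by simp) (by omega) (fun k hk => Or.inl (h0 k hk)) j (by omega)
  rw [hz] at this
  rw [this]
  have h00 := h0 0 (by omega)
  simp only [Nat.cast_zero] at h00
  by_cases hj0 : 0 < j
  · rw [if_pos (by omega), h00]
    simp
  · have : j = 0 := by omega
    subst this
    rw [if_neg (by omega), h0 0 (by omega)]
    simp [sumMods]

lemma query_eq (nums : List Int) (s e : Int) (hs : 0 ≤ s) (hse : s ≤ e + 1) (he : e + 1 ≤ (nums.length : Int)) :
    (decide (¬ sumMods (nums.take s.toNat) % 2 = sumMods (nums.take (e + 1).toNat) % 2)) =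
    decide (PySem.Int.mod ((PySem.List.pyRange s (e + 1) 1).foldl
      (fun a i => a + PySem.Int.mod (PySem.List.pyGetD nums i 0) 2) 0) 2 = 1) := by
  have hk : (nums.take (e + 1).toNat).length = (e + 1).toNat := by
    rw [List.length_take]; omega
  have hcongr : (PySem.List.pyRange s (e + 1) 1).foldl
      (fun a i => a + PySem.Int.mod (PySem.List.pyGetD nums i 0) 2) 0 =
      (PySem.List.pyRange s (e + 1) 1).foldl
      (fun a i => a + PySem.Int.mod (PySem.List.pyGetD (nums.take (e + 1).toNat) i 0) 2) 0 := by
    apply PySem.List.foldl_congr_mem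
    intro acc i hi
    rw [PySem.List.mem_pyRange_one] at hi
    rw [show i = ((i.toNat : Nat) : Int) from by omega, PySem.List.pyGetD_natCast,
        PySem.List.pyGetD_natCast]
    congr 2
    have hlt : i.toNat < (e + 1).toNat := by omega
    simp [List.getD_eq_getElem?_getD, hlt]
  have hfold := PySem.List.foldl_pyRange_pyGetD' (nums.take (e + 1).toNat) 0
      (fun a x => a + PySem.Int.mod x 2) 0 hs
  rw [hk, show (((e + 1).toNat : Nat) : Int) = e + 1 from by omega] at hfold
  rw [hcongr, hfold, foldl_add_mod, List.drop_take, mod_two_eq_emod]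
  have hsplit : nums.take (e + 1).toNat =
      nums.take s.toNat ++ (nums.drop s.toNat).take ((e + 1).toNat - s.toNat) := by
    have h1 : (e + 1).toNat = s.toNat + ((e + 1).toNat - s.toNat) := by omega
    rw [h1, List.take_add]
    simp
  rw [hsplit, sumMods_append, decide_eq_decide]
  omega

lemma foldl_append_congr {a : Type} (l : List a) (f g : a → Bool)
    (h : ∀ x ∈ l, f x = g x) (acc : List Bool) :
    l.foldl (fun ac x => ac ++ [f x]) acc = l.foldl (fun ac x => ac ++ [g x]) acc := by
  rw [PySem.List.foldl_append_singleton_eq_map, PySem.List.foldl_append_singleton_eq_map,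
      List.map_congr_left h]

-- ===== VERDICT (by name: the statement is the Claim_ definition above) =====
theorem specialArrayII_spec : Claim_equal_specialArrayII := by
  intro nums queries _ hpre
  unfold Spec_specialArrayII specialArrayII specialArrayII_alt
  simp only []
  have hAstep : (fun (answer : List Bool) (q : List Int) =>
      if PySem.List.pyGetD
          ((PySem.List.enumerate nums 0).foldl
            (fun ps p => PySem.List.pySetD ps (p.1 + 1)
                (PySem.Int.bxor (PySem.List.pyGetD ps p.1 0) (PySem.Int.mod p.2 2)))
            (List.replicate (nums.length + 1) 0)) (PySem.List.pyGetD q 0 0) 0 ≠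
        PySem.List.pyGetD
          ((PySem.List.enumerate nums 0).foldl
            (fun ps p => PySem.List.pySetD ps (p.1 + 1)
                (PySem.Int.bxor (PySem.List.pyGetD ps p.1 0) (PySem.Int.mod p.2 2)))
            (List.replicate (nums.length + 1) 0)) (PySem.List.pyGetD q 1 0 + 1) 0
      then answer ++ [true] else answer ++ [false]) = fun answer q => answer ++
        [decide (PySem.List.pyGetD
          ((PySem.List.enumerate nums 0).foldl
            (fun ps p => PySem.List.pySetD ps (p.1 + 1)
                (PySem.Int.bxor (PySem.List.pyGetD ps p.1 0) (PySem.Int.mod p.2 2)))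
            (List.replicate (nums.length + 1) 0)) (PySem.List.pyGetD q 0 0) 0 ≠
        PySem.List.pyGetD
          ((PySem.List.enumerate nums 0).foldl
            (fun ps p => PySem.List.pySetD ps (p.1 + 1)
                (PySem.Int.bxor (PySem.List.pyGetD ps p.1 0) (PySem.Int.mod p.2 2)))
            (List.replicate (nums.length + 1) 0)) (PySem.List.pyGetD q 1 0 + 1) 0)] := by
    funext ans q
    split_ifs with h
    · rw [decide_eq_true h]
    · rw [decide_eq_false h]
  rw [hAstep]
  apply foldl_append_congr
  intro q hq
  obtain ⟨hlen2, hge, hle, hlt⟩ := hpre q hq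
  obtain ⟨a, b, rfl⟩ := List.length_eq_two.mp hlen2
  simp only [List.getD_cons_zero, List.getD_cons_succ] at hge hle hlt
  have hget0 : PySem.List.pyGetD [a, b] 0 0 = a := rfl
  have hget1 : PySem.List.pyGetD [a, b] 1 0 = b := rfl
  rw [hget0, hget1]
  have ha : a = ((a.toNat : Nat) : Int) := (Int.toNat_of_nonneg hge).symm
  have hb : b + 1 = (((b + 1).toNat : Nat) : Int) := by omega
  rw [show PySem.List.pyGetD
        ((PySem.List.enumerate nums 0).foldl
          (fun ps p => PySem.List.pySetD ps (p.1 + 1)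
              (PySem.Int.bxor (PySem.List.pyGetD ps p.1 0) (PySem.Int.mod p.2 2)))
          (List.replicate (nums.length + 1) 0)) a 0 = sumMods (nums.take a.toNat) % 2 from by
      rw [ha]; exact prefix_table nums a.toNat (by omega),
      show PySem.List.pyGetD
        ((PySem.List.enumerate nums 0).foldl
          (fun ps p => PySem.List.pySetD ps (p.1 + 1)
              (PySem.Int.bxor (PySem.List.pyGetD ps p.1 0) (PySem.Int.mod p.2 2)))
          (List.replicate (nums.length + 1) 0)) (b + 1) 0 = sumMods (nums.take (b + 1).toNat) % 2 from by
      rw [hb]; exact prefix_table nums (b + 1).toNat (by omega)]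
  simpa only [ne_eq] using query_eq nums a b hge hle hlt
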